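-- pv_equiv track=rewrite | github.com/RisingLight/Python_Practice | Challenge questions/Hemant-60/c1.py | print_without_spaces
-- ===== SOURCE A (Python) =====
-- def print_without_spaces(some_str):
--     flag = 0
--     other_str=""
--     for i in some_str:
--         if flag == 0 and i!=" ":
--             other_str+=i
--         elif i==" ":
--             flag=1
--         elif flag==1 and i!=" ":
--             flag=0
--             i=i.upper()
--             other_str+=i
--
--     return other_str
-- ===== SOURCE B (Python) =====
-- def print_without_spaces(some_str):
--     tokens = some_str.split(" ")
--     return tokens[0] + "".join(t[:1].upper() + t[1:] for t in tokens[1:])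
-- ===== Notes on version B (the rewrite author's own statement) =====
-- stated objective: simpler
-- what changed: Replaced A's per-character flag state machine by tokenizing on single spaces and concatenating the first token verbatim with each later token's first character uppercased (t[:1].upper() + t[1:]).
import Mathlib
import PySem

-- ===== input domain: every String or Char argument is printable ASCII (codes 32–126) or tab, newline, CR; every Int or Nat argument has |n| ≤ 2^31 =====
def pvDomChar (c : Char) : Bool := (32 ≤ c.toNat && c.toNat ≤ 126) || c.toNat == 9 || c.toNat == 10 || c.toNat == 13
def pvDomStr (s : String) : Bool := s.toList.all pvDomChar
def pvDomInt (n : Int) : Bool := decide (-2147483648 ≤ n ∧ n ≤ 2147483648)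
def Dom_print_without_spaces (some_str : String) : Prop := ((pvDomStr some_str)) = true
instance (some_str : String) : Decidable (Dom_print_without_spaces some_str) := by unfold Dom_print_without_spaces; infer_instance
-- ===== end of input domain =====

-- B replaces A's per-character flag state machine by split-on-space then
-- capitalize-first-letter of each later token (objective: simpler).

-- ===== PORT A =====
-- per-character loop with a flag; the accumulator is the List Char of the result
def pvStepA (st : Int × List Char) (i : Char) : Int × List Char :=
  if st.1 == 0 && i != ' ' then (st.1, st.2 ++ [i])
  else if i == ' ' then (1, st.2)
  else if st.1 == 1 && i != ' ' then ((0 : Int), st.2 ++ [PySem.Chars.upperChar i])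
  else st

def print_without_spaces (some_str : String) : String :=
  let r := some_str.toList.foldl pvStepA ((0 : Int), ([] : List Char))
  String.ofList r.2

-- ===== PORT B =====
-- t[:1].upper() + t[1:]
def pvCap (t : List Char) : List Char :=
  PySem.Chars.upper (PySem.Chars.slice t none (some 1)) ++ PySem.Chars.slice t (some 1) none

def print_without_spaces_alt (some_str : String) : String :=
  let tokens := PySem.Chars.splitOn some_str.toList [' ']
  match tokens with
  | [] => ""   -- unreachable (split never returns an empty list); totality guard only
  | t :: ts => String.ofList (t ++ PySem.Chars.join [] (ts.map pvCap))

-- ===== PRECONDITION & SPEC =====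
def Spec_print_without_spaces (some_str : String) (out : String) : Prop := out = print_without_spaces_alt some_str
instance (some_str : String) (out : String) : Decidable (Spec_print_without_spaces some_str out) := by unfold Spec_print_without_spaces; infer_instance

-- ===== CLAIM (what is proved, stated in full; the proofs are below) =====
def Claim_equal_print_without_spaces : Prop := ∀ (some_str : String), Dom_print_without_spaces some_str → Spec_print_without_spaces some_str (print_without_spaces some_str)

-- ===== LEMMAS AND PROOFS =====

-- proof-side model of A's state machine: fg false = flag 0, fg true = flag 1
def fg : Bool → List Char → List Char
  | _, [] => []
  | false, c :: xs => if c = ' ' then fg true xs else c :: fg false xs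
  | true,  c :: xs => if c = ' ' then fg true xs else PySem.Chars.upperChar c :: fg false xs

-- proof-side model of split on a single space
def split1 : List Char → List (List Char)
  | [] => [[]]
  | c :: xs =>
      if c = ' ' then [] :: split1 xs
      else match split1 xs with
           | [] => [[c]]
           | t :: ts => (c :: t) :: ts

def upperFirst : List Char → List Char
  | [] => []
  | c :: xs => PySem.Chars.upperChar c :: xs

theorem split1_ne_nil (s : List Char) : split1 s ≠ [] := by
  cases s with
  | nil => simp [split1]
  | cons c xs =>
    simp only [split1]
    split_ifs
    · simp
    · cases h : split1 xs <;> simp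

theorem split1_eq_cons (s : List Char) : split1 s = (split1 s).headI :: (split1 s).tail := by
  cases h : split1 s with
  | nil => exact absurd h (split1_ne_nil s)
  | cons t ts => simp

theorem go_space (fuel : ℕ) : ∀ (l cur : List Char) (accs : List (List Char)),
    l.length + 1 ≤ fuel →
    PySem.Chars.splitOn.go [' '] fuel l cur accs =
      accs.reverse ++ ((cur.reverse ++ (split1 l).headI) :: (split1 l).tail) := by
  induction fuel with
  | zero => intro l cur accs h; omega
  | succ n ih =>
    intro l cur accs h
    cases l with
    | nil =>
      simp [PySem.Chars.splitOn.go, split1]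
    | cons c rest =>
      by_cases hc : c = ' '
      · subst hc
        have hpre : [' '].isPrefixOf (' ' :: rest) = true := by
          simp [List.isPrefixOf]
        rw [show PySem.Chars.splitOn.go [' '] (n+1) (' ' :: rest) cur accs =
              PySem.Chars.splitOn.go [' '] n (List.drop 1 (' ' :: rest)) [] (cur.reverse :: accs) by
            simp [PySem.Chars.splitOn.go, hpre]]
        rw [show List.drop 1 (' ' :: rest) = rest from rfl,
            ih rest [] (cur.reverse :: accs) (by simp at h ⊢; omega)]
        simp [split1, (split1_eq_cons rest).symm]
      · have hpre : [' '].isPrefixOf (c :: rest) = false := by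
          simp [List.isPrefixOf]; intro h'; exact hc h'.symm
        rw [show PySem.Chars.splitOn.go [' '] (n+1) (c :: rest) cur accs =
              PySem.Chars.splitOn.go [' '] n rest (c :: cur) accs by
            simp [PySem.Chars.splitOn.go, hpre]]
        rw [ih rest (c :: cur) accs (by simp at h ⊢; omega)]
        simp only [split1, if_neg hc]
        rw [split1_eq_cons rest]
        simp

theorem splitOn_space (s : List Char) :
    PySem.Chars.splitOn s [' '] = split1 s := by
  unfold PySem.Chars.splitOn
  rw [go_space (s.length + 1) s [] [] (le_refl _)]
  simpa using (split1_eq_cons s).symm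

theorem pvCap_eq (t : List Char) : pvCap t = upperFirst t := by
  unfold pvCap
  cases t with
  | nil => simp [PySem.Chars.upper, upperFirst,
      PySem.List.slice_to ([] : List Char) (by norm_num : (0:ℤ) ≤ 1),
      PySem.List.slice_from ([] : List Char) (by norm_num : (0:ℤ) ≤ 1)]
  | cons c xs => simp [PySem.Chars.upper, upperFirst,
      PySem.List.slice_to (c :: xs) (by norm_num : (0:ℤ) ≤ 1),
      PySem.List.slice_from (c :: xs) (by norm_num : (0:ℤ) ≤ 1)]

theorem join_empty (parts : List (List Char)) :
    PySem.Chars.join [] parts = parts.flatten := by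
  induction parts with
  | nil => simp [PySem.Chars.join, List.intercalate]
  | cons p ps ih =>
    cases ps with
    | nil => simp [PySem.Chars.join, List.intercalate]
    | cons q qs =>
      simp only [PySem.Chars.join, List.intercalate] at ih ⊢
      simp [List.intersperse] at ih ⊢
      simpa using ih

-- fg agrees with split1-then-capitalize
theorem fg_split1 (s : List Char) :
    fg false s = (split1 s).headI ++ ((split1 s).tail.map upperFirst).flatten ∧
    fg true s = ((split1 s).map upperFirst).flatten := by
  induction s with
  | nil => simp [fg, split1, upperFirst]
  | cons c xs ih =>
    by_cases hc : c = ' '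
    · subst hc
      simp only [fg, split1]
      exact ⟨by simpa using ih.2, by simpa [upperFirst] using ih.2⟩
    · simp only [fg, split1, if_neg hc]
      rw [split1_eq_cons xs]
      constructor
      · simpa [hc] using congrArg (c :: ·) ih.1
      · simp [upperFirst, ih.1]

-- A's fold computes fg
theorem stepA_zero_space : pvStepA (0, acc) ' ' = (1, acc) := by simp [pvStepA]
theorem stepA_one_space : pvStepA (1, acc) ' ' = (1, acc) := by simp [pvStepA]
theorem stepA_zero_char (acc : List Char) (c : Char) (hc : c ≠ ' ') :
    pvStepA (0, acc) c = (0, acc ++ [c]) := by simp [pvStepA, hc]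
theorem stepA_one_char (acc : List Char) (c : Char) (hc : c ≠ ' ') :
    pvStepA (1, acc) c = (0, acc ++ [PySem.Chars.upperChar c]) := by simp [pvStepA, hc]

theorem foldA (xs : List Char) : ∀ acc : List Char,
    (xs.foldl pvStepA ((0 : Int), acc)).2 = acc ++ fg false xs ∧
    (xs.foldl pvStepA ((1 : Int), acc)).2 = acc ++ fg true xs := by
  induction xs with
  | nil => intro acc; simp [fg]
  | cons c rest ih =>
    intro acc
    by_cases hc : c = ' '
    · subst hc
      constructor
      · rw [List.foldl_cons, stepA_zero_space]
        simpa [fg] using (ih acc).2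
      · rw [List.foldl_cons, stepA_one_space]
        simpa [fg] using (ih acc).2
    · constructor
      · rw [List.foldl_cons, stepA_zero_char acc c hc]
        simp only [fg, if_neg hc]
        simpa using (ih (acc ++ [c])).1
      · rw [List.foldl_cons, stepA_one_char acc c hc]
        simp only [fg, if_neg hc]
        simpa using (ih (acc ++ [PySem.Chars.upperChar c])).1

-- ===== VERDICT (by name: the statement is the Claim_ definition above) =====
theorem print_without_spaces_spec : Claim_equal_print_without_spaces := by
  intro s _
  unfold Spec_print_without_spaces print_without_spaces print_without_spaces_alt
  rw [splitOn_space s.toList]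
  rw [split1_eq_cons s.toList]
  simp only
  rw [(foldA s.toList []).1, (fg_split1 s.toList).1]
  rw [join_empty, show pvCap = upperFirst from funext pvCap_eq]
  rw [split1_eq_cons s.toList]
  simp
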